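-- pv_equiv track=rewrite | github.com/Vegas30/Python | HomeWork/HW15/hw15.py | min_max_digit
-- ===== SOURCE A (Python) =====
-- def min_max_digit(number):
--     min_digit = 9
--     max_digit = 0
--     for digit in str(number):
--         if int(digit) < min_digit:
--             min_digit = int(digit)
--         if int(digit) > max_digit:
--             max_digit = int(digit)
--
--     return min_digit, max_digit
-- ===== SOURCE B (Python) =====
-- def min_max_digit(number):
--     def go(n):
--         if n < 10:
--             return n, n
--         lo, hi = go(n // 10)
--         d = n % 10
--         return (d if d < lo else lo), (d if d > hi else hi)
--     return go(abs(number))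
-- ===== Notes on version B (the rewrite author's own statement) =====
-- stated objective: alternative
-- what changed: A iterates over the characters of str(number) accumulating min and max with int() on each character; B never converts to a string: it decomposes the number arithmetically by recursion that strips the last decimal digit, combining that digit with the recursive result.
-- crash fix: On negative numbers A raises ValueError (int('-') on the sign character) while B returns the min and max digit of the absolute value. — e.g. on min_max_digit(-507): A raises ValueError, B returns (0, 7)
import Mathlib
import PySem

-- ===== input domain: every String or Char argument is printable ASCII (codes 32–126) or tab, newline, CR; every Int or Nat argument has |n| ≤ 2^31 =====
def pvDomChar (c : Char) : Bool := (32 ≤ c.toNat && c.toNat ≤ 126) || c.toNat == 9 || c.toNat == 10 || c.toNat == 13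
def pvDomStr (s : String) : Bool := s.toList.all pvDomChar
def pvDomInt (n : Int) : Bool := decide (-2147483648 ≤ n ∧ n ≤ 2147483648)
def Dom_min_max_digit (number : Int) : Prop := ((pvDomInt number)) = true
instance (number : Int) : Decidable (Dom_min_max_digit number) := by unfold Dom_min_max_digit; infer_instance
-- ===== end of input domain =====

-- B replaces A's character loop over str(number) by an arithmetic recursion that
-- strips the last decimal digit and combines it with the recursive result
-- (no string conversion at all); same cost, different algorithm.

-- int(d) for a one-character string d; the .getD 0 is unreachable under Pre_ (every
-- character of str(number) for number ≥ 0 is a decimal digit, where int() returns).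
def pvIntOfChar (c : Char) : Int := (PySem.Int.ofChars? [c]).getD 0

-- ===== PORT A =====
def min_max_digit (number : Int) : Int × Int :=
  (PySem.Int.toChars number).foldl
    (fun st c =>
      let st1 := if pvIntOfChar c < st.1 then (pvIntOfChar c, st.2) else st
      if pvIntOfChar c > st1.2 then (st1.1, pvIntOfChar c) else st1)
    (9, 0)

-- ===== PORT B =====
-- go from Source B; its argument abs(number) is nonnegative, so Nat's / and % are
-- exactly Python's // and % here.
def pvGo (n : Nat) : Int × Int :=
  if n < 10 then ((n : Int), (n : Int))
  else
    let p := pvGo (n / 10)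
    let d : Int := ((n % 10 : Nat) : Int)
    ((if d < p.1 then d else p.1), (if d > p.2 then d else p.2))
decreasing_by exact Nat.div_lt_self (by omega) (by omega)

def min_max_digit_alt (number : Int) : Int × Int := pvGo number.natAbs

-- ===== PRECONDITION & SPEC =====
-- A raises ValueError on every negative number (int() applied to the sign character), so Pre_ admits exactly the nonnegative numbers.
def Pre_min_max_digit (number : Int) : Prop := 0 ≤ number
instance (number : Int) : Decidable (Pre_min_max_digit number) := by unfold Pre_min_max_digit; infer_instance
def pvWitness_min_max_digit : Int := (507)

-- On negative numbers A raises ValueError while B returns the min/max digit of the absolute value.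
def Raises_min_max_digit (number : Int) : Prop := number < 0
instance (number : Int) : Decidable (Raises_min_max_digit number) := by unfold Raises_min_max_digit; infer_instance
def pvRaiseWitness_min_max_digit : Int := (-507)
def pvRaiseWitnessOut_min_max_digit : Int × Int := (0, 7)

def Spec_min_max_digit (number : Int) (out : Int × Int) : Prop := out = min_max_digit_alt number
instance (number : Int) (out : Int × Int) : Decidable (Spec_min_max_digit number out) := by unfold Spec_min_max_digit; infer_instance

-- ===== CLAIM (what is proved, stated in full; the proofs are below) =====
def Claim_equal_min_max_digit : Prop := ∀ (number : Int), Dom_min_max_digit number → Pre_min_max_digit number → Spec_min_max_digit number (min_max_digit number)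
def Claim_raises_min_max_digit : Prop := (∀ (number : Int), Dom_min_max_digit number → Raises_min_max_digit number → ¬ Pre_min_max_digit number) ∧ (Dom_min_max_digit (pvRaiseWitness_min_max_digit) ∧ Raises_min_max_digit (pvRaiseWitness_min_max_digit) ∧ min_max_digit_alt (pvRaiseWitness_min_max_digit) = pvRaiseWitnessOut_min_max_digit)

-- ===== LEMMAS AND PROOFS =====

-- A's two-conditional step splits into independent min and max folds.
theorem pv_fold_split (vs : List Int) (mn mx : Int) :
    vs.foldl
      (fun st v =>
        let st1 := if v < st.1 then (v, st.2) else st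
        if v > st1.2 then (st1.1, v) else st1)
      (mn, mx)
    = (vs.foldl (fun m v => if v < m then v else m) mn,
       vs.foldl (fun m v => if m < v then v else m) mx) := by
  induction vs generalizing mn mx with
  | nil => rfl
  | cons v rest ih =>
    simp only [List.foldl_cons]
    by_cases h1 : v < mn <;> by_cases h2 : mx < v <;>
      simp [h1, h2, gt_iff_lt, ih]

theorem pv_char_val (k : Nat) (h : k < 10) : pvIntOfChar k.digitChar = (k : Int) := by
  interval_cases k <;> decide

-- A's two seeded folds over the decimal digit characters compute exactly B's recursion.
theorem pv_main (n : Nat) :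
    ((Nat.toDigits 10 n).map pvIntOfChar).foldl (fun m v => if v < m then v else m) 9 = (pvGo n).1
    ∧ ((Nat.toDigits 10 n).map pvIntOfChar).foldl (fun m v => if m < v then v else m) 0 = (pvGo n).2 := by
  induction n using Nat.strong_induction_on with
  | _ n ih =>
    by_cases h : n < 10
    · rw [Nat.toDigits_of_lt_base h, pvGo]
      simp only [if_pos h, List.map_cons, List.map_nil, List.foldl_cons, List.foldl_nil,
        pv_char_val n h]
      constructor
      · by_cases h9 : (n : Int) < 9 <;> simp [h9] <;> omega
      · by_cases h0 : (0 : Int) < (n : Int) <;> simp only [if_pos, if_neg, h0, ite_true, ite_false] <;> omega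
    · have hdiv : n / 10 < n := Nat.div_lt_self (by omega) (by omega)
      obtain ⟨ihmin, ihmax⟩ := ih (n / 10) hdiv
      rw [Nat.toDigits_eq_if (by norm_num), if_neg h, pvGo]
      simp only [if_neg h, List.map_append, List.map_cons, List.map_nil, List.foldl_append,
        List.foldl_cons, List.foldl_nil, pv_char_val (n % 10) (Nat.mod_lt _ (by omega)),
        ihmin, ihmax, gt_iff_lt]
      exact ⟨trivial, trivial⟩

-- ===== VERDICT (by name: the statement is the Claim_ definition above) =====
theorem min_max_digit_spec : Claim_equal_min_max_digit := by
  intro number _ hpre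
  have hneg : ¬ number < 0 := not_lt.mpr hpre
  have habs : number.natAbs = number.toNat := by omega
  simp only [Spec_min_max_digit, min_max_digit, min_max_digit_alt, habs]
  rw [show PySem.Int.toChars number = Nat.toDigits 10 number.toNat by
        simp [PySem.Int.toChars, hneg, Nat.toDigits],
      ← List.foldl_map (f := pvIntOfChar)
        (g := fun st v =>
          let st1 := if v < st.1 then (v, st.2) else st
          if v > st1.2 then (st1.1, v) else st1),
      pv_fold_split, (pv_main number.toNat).1, (pv_main number.toNat).2]

theorem min_max_digit_raises : Claim_raises_min_max_digit := by
  unfold Claim_raises_min_max_digit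
  refine ⟨fun n _ h => by simp only [Pre_min_max_digit, Raises_min_max_digit] at h ⊢; omega, by decide, by decide, ?_⟩
  show pvGo 507 = (0, 7)
  rw [pvGo]; norm_num
  rw [pvGo]; norm_num
  rw [pvGo]; norm_num

-- self-check: the raise-witness value asserted above is the one the theorem proves
theorem pv_raise_witness_ok : min_max_digit_alt pvRaiseWitness_min_max_digit = pvRaiseWitnessOut_min_max_digit :=
  min_max_digit_raises.2.2.2
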